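-- pv_equiv track=rewrite | github.com/AngelicaDiazB14/CLASESP. | clase 1 intro.py | construirNumeroCola_aux
-- ===== SOURCE A (Python) =====
-- def construirNumeroCola_aux(n,divisor,potencia,resultado):
--     if(n == 0):
--         return resultado
--     else:
--         digito = (n%10)
--         if(digito != 0):
--             if((digito % divisor) == 0):
--                 resultado += (digito *(10**potencia))
--                 return construirNumeroCola_aux(n//10,divisor,potencia + 1, resultado)
--             else:
--                 return construirNumeroCola_aux(n//10,divisor,potencia, resultado)
--         else:
--             return construirNumeroCola_aux(n//10,divisor,potencia,resultado)
-- ===== SOURCE B (Python) =====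
-- def _digitos(n):
--     # digits of n, least-significant first
--     if n == 0:
--         return []
--     return [n % 10] + _digitos(n // 10)
--
-- def construirNumeroCola_aux(n, divisor, potencia, resultado):
--     seleccionados = [d for d in _digitos(n) if d != 0 and d % divisor == 0]
--     if not seleccionados:
--         return resultado
--     empaquetado = 0
--     for d in reversed(seleccionados):
--         empaquetado = empaquetado * 10 + d
--     return resultado + empaquetado * 10 ** potencia
-- ===== Notes on version B (the rewrite author's own statement) =====
-- stated objective: alternative
-- what changed: Instead of A's four-way tail recursion threading (potencia, resultado), B first builds the least-significant-first digit list, filters the nonzero digits divisible by divisor, packs them with a Horner loop over the reversed list, and shifts once by 10**potencia.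
-- outside the precondition, e.g. on construirNumeroCola_aux(164, 1, -1, 5): A returns 21.4, B returns 21.400000000000002; on construirNumeroCola_aux(0, 0, 0, 5): A returns 5, B returns 5; on construirNumeroCola_aux(13, 5, -2, 7): A returns 7, B returns 7
import Mathlib
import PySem

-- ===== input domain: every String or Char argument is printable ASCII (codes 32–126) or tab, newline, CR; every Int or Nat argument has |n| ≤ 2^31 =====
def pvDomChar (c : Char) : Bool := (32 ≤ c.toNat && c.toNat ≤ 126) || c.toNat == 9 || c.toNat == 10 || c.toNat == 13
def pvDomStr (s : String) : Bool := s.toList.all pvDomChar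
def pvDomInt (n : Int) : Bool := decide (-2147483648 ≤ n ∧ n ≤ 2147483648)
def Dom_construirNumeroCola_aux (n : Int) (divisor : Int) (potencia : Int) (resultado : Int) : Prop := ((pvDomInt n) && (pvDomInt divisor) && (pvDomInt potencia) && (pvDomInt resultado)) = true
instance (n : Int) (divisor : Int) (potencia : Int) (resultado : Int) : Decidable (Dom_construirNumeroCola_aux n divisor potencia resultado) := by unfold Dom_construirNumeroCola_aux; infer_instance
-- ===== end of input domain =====

-- B gathers the filtered digit list first and packs it with a Horner pass plus one final 10**potencia shift, instead of A's four-way tail recursion threading (potencia, resultado) (alternative decomposition; same cost).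


-- ===== PORT A =====
-- Literal port of A's tail recursion. 'if n < 0' is a totality guard only: Python
-- recurses forever there (outside Pre_); '10 ** potencia' uses potencia.toNat, exact for
-- potencia ≥ 0 (Pre_; Python yields a float for negative potencia on that branch).
def construirNumeroCola_aux (n : Int) (divisor : Int) (potencia : Int) (resultado : Int) : Int :=
  if n == 0 then resultado
  else if n < 0 then 0   -- totality guard (Python does not terminate here)
  else
    let digito := PySem.Int.mod n 10
    if digito != 0 then
      if PySem.Int.mod digito divisor == 0 then
        construirNumeroCola_aux (PySem.Int.floordiv n 10) divisor (potencia + 1)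
          (resultado + digito * 10 ^ potencia.toNat)
      else
        construirNumeroCola_aux (PySem.Int.floordiv n 10) divisor potencia resultado
    else
      construirNumeroCola_aux (PySem.Int.floordiv n 10) divisor potencia resultado
termination_by n.toNat
decreasing_by
  all_goals
    rw [PySem.Int.floordiv_eq_ediv_of_pos (by norm_num : (0:Int) < 10)]
    simp_all
    omega

-- ===== PORT B =====
-- Port of Source B's _digitos: the least-significant-first digit list of n.
-- Same totality guard for n < 0 (Python recurses forever there, outside Pre_).
def pvDigitos (n : Int) : List Int :=
  if n == 0 then []
  else if n < 0 then []   -- totality guard (Python does not terminate here)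
  else [PySem.Int.mod n 10] ++ pvDigitos (PySem.Int.floordiv n 10)
termination_by n.toNat
decreasing_by
  rw [PySem.Int.floordiv_eq_ediv_of_pos (by norm_num : (0:Int) < 10)]
  simp_all
  omega

-- Port of Source B: filter the digit list; if nothing was selected return resultado,
-- else Horner-pack the reversed list and shift once by 10**potencia.
def construirNumeroCola_aux_alt (n : Int) (divisor : Int) (potencia : Int) (resultado : Int) : Int :=
  let seleccionados := (pvDigitos n).filter
    (fun d => d != 0 && (PySem.Int.mod d divisor == 0))
  if seleccionados.isEmpty then resultado
  else
    let empaquetado := seleccionados.reverse.foldl (fun acc d => acc * 10 + d) 0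
    resultado + empaquetado * 10 ^ potencia.toNat

-- ===== PRECONDITION & SPEC =====
-- Pre_ excludes inputs where Python A either does not return an int or may raise:
-- n < 0 (infinite recursion), divisor = 0 (ZeroDivisionError on the first nonzero
-- digit) and potencia < 0 (10**potencia is a float on a matching digit). When n's
-- digits make those branches unreachable A still returns normally on some excluded
-- inputs (see cites); B agrees there up to float rounding of 10**potencia for potencia < 0.
def Pre_construirNumeroCola_aux (n : Int) (divisor : Int) (potencia : Int) (resultado : Int) : Prop :=
  0 ≤ n ∧ divisor ≠ 0 ∧ 0 ≤ potencia
instance (n : Int) (divisor : Int) (potencia : Int) (resultado : Int) : Decidable (Pre_construirNumeroCola_aux n divisor potencia resultado) := by unfold Pre_construirNumeroCola_aux; infer_instance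

def pvWitness_construirNumeroCola_aux : Int × Int × Int × Int := (2468, 2, 0, 0)

def Spec_construirNumeroCola_aux (n : Int) (divisor : Int) (potencia : Int) (resultado : Int) (out : Int) : Prop := out = construirNumeroCola_aux_alt n divisor potencia resultado
instance (n : Int) (divisor : Int) (potencia : Int) (resultado : Int) (out : Int) : Decidable (Spec_construirNumeroCola_aux n divisor potencia resultado out) := by unfold Spec_construirNumeroCola_aux; infer_instance

-- ===== CLAIM (what is proved, stated in full; the proofs are below) =====
def Claim_equal_construirNumeroCola_aux : Prop := ∀ (n : Int) (divisor : Int) (potencia : Int) (resultado : Int), Dom_construirNumeroCola_aux n divisor potencia resultado → Pre_construirNumeroCola_aux n divisor potencia resultado → Spec_construirNumeroCola_aux n divisor potencia resultado (construirNumeroCola_aux n divisor potencia resultado)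

-- ===== LEMMAS AND PROOFS =====

-- Place value of a least-significant-first digit list: hval [d0,d1,...] = sum di*10^i.
def hval : List Int → Int
  | [] => 0
  | d :: t => d + 10 * hval t

-- The Horner fold over the reversed list computes hval.
theorem foldl_reverse_hval (ds : List Int) :
    ds.reverse.foldl (fun acc d => acc * 10 + d) 0 = hval ds := by
  rw [List.foldl_reverse]
  induction ds with
  | nil => rfl
  | cons d t ih => simp only [List.foldr_cons, hval, ih]; omega

-- One unfolding step of pvDigitos on a positive argument.
theorem pvDigitos_step (n : Int) (h0 : ¬(n == 0) = true) (h1 : ¬n < 0) :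
    pvDigitos n = PySem.Int.mod n 10 :: pvDigitos (PySem.Int.floordiv n 10) := by
  rw [pvDigitos, if_neg h0, if_neg h1, List.singleton_append]

-- Characterisation of A: for n ≥ 0, potencia ≥ 0 it adds the packed filtered digits.
theorem portA_char (n divisor potencia resultado : Int)
    (hn : 0 ≤ n) (hp : 0 ≤ potencia) :
    construirNumeroCola_aux n divisor potencia resultado
      = resultado
        + hval ((pvDigitos n).filter
            (fun d => d != 0 && (PySem.Int.mod d divisor == 0))) * 10 ^ potencia.toNat := by
  fun_induction construirNumeroCola_aux n divisor potencia resultado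
  case case1 =>
    rename_i n p r h0
    have hn0 : n = 0 := by simpa using h0
    subst hn0
    have hnil : pvDigitos 0 = [] := by rw [pvDigitos]; rfl
    rw [hnil]
    simp [hval]
  case case2 => omega
  case case3 =>
    rename_i n p r h0 h1 dig hdnz hmod ih
    have hrec : (0:Int) ≤ PySem.Int.floordiv n 10 := by
      rw [PySem.Int.floordiv_eq_ediv_of_pos (by norm_num : (0:Int) < 10)]; omega
    rw [ih hrec (by omega), pvDigitos_step n h0 h1, List.filter_cons,
        if_pos (by change (dig != 0 && (PySem.Int.mod dig divisor == 0)) = true; rw [hdnz, hmod]; rfl)]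
    simp only [hval]
    have hpt : (p + 1).toNat = p.toNat + 1 := by omega
    rw [hpt]
    ring
  case case4 =>
    rename_i n p r h0 h1 dig hdnz hmod ih
    have hrec : (0:Int) ≤ PySem.Int.floordiv n 10 := by
      rw [PySem.Int.floordiv_eq_ediv_of_pos (by norm_num : (0:Int) < 10)]; omega
    rw [ih hrec hp, pvDigitos_step n h0 h1, List.filter_cons, if_neg (by rw [Bool.and_eq_true]; exact fun h => hmod h.2)]
  case case5 =>
    rename_i n p r h0 h1 dig hdz ih
    have hrec : (0:Int) ≤ PySem.Int.floordiv n 10 := by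
      rw [PySem.Int.floordiv_eq_ediv_of_pos (by norm_num : (0:Int) < 10)]; omega
    rw [ih hrec hp, pvDigitos_step n h0 h1, List.filter_cons, if_neg (by rw [Bool.and_eq_true]; exact fun h => hdz h.1)]

-- ===== VERDICT (by name: the statement is the Claim_ definition above) =====
theorem construirNumeroCola_aux_spec : Claim_equal_construirNumeroCola_aux := by
  intro n divisor potencia resultado _ hpre
  show construirNumeroCola_aux n divisor potencia resultado
      = if ((pvDigitos n).filter
            (fun d => d != 0 && (PySem.Int.mod d divisor == 0))).isEmpty then resultado
        else resultado
          + ((pvDigitos n).filter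
              (fun d => d != 0 && (PySem.Int.mod d divisor == 0))).reverse.foldl
              (fun acc d => acc * 10 + d) 0 * 10 ^ potencia.toNat
  rw [foldl_reverse_hval, portA_char n divisor potencia resultado hpre.1 hpre.2.2]
  by_cases hsel : ((pvDigitos n).filter
      (fun d => d != 0 && (PySem.Int.mod d divisor == 0))).isEmpty
  · rw [if_pos hsel, List.isEmpty_iff.mp hsel]
    simp [hval]
  · rw [if_neg hsel]
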